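-- pv_equiv track=rewrite | github.com/tztsai/adventofcode2023 | day22.py | find_bricks_below
-- ===== SOURCE A (Python) =====
-- from collections import defaultdict
-- from itertools import product
--
-- def find_bricks_below(bricks):
--     bricks.sort(key=lambda b: b[2][0])
--     occupies = defaultdict(list)
--     belows = defaultdict(set)
--     for i, brick in enumerate(bricks):
--         (x_lo, x_hi), (y_lo, y_hi) = brick[:2]
--         for x, y in product(range(x_lo, x_hi+1), range(y_lo, y_hi+1)):
--             bricks_below = occupies[x, y]
--             belows[i].update(bricks_below)
--             bricks_below.append(i)
--     return belows
-- ===== SOURCE B (Python) =====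
-- from collections import defaultdict
-- from itertools import takewhile
--
--
-- def find_bricks_below(bricks):
--     bricks.sort(key=lambda b: b[2][0])
--     # pass 1: full occupancy columns, bricks listed bottom-up (index order)
--     occupies = defaultdict(list)
--     for i, ((x_lo, x_hi), (y_lo, y_hi), _) in enumerate(bricks):
--         for x in range(x_lo, x_hi + 1):
--             for y in range(y_lo, y_hi + 1):
--                 occupies[x, y].append(i)
--     # pass 2: bricks below i in a column are exactly the earlier entries of that column
--     belows = defaultdict(set)
--     for i, ((x_lo, x_hi), (y_lo, y_hi), _) in enumerate(bricks):
--         for x in range(x_lo, x_hi + 1):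
--             for y in range(y_lo, y_hi + 1):
--                 belows[i].update(takewhile(lambda j: j < i, occupies[x, y]))
--     return belows
-- ===== Notes on version B (the rewrite author's own statement) =====
-- stated objective: alternative
-- what changed: A interleaves reading and extending the occupancy map in a single pass, updating belows from the map's evolving state; B separates concerns into two passes: it first builds the complete per-column occupancy stacks, then derives belows[i] for each brick from the entries of its columns that precede i.
import Mathlib
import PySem

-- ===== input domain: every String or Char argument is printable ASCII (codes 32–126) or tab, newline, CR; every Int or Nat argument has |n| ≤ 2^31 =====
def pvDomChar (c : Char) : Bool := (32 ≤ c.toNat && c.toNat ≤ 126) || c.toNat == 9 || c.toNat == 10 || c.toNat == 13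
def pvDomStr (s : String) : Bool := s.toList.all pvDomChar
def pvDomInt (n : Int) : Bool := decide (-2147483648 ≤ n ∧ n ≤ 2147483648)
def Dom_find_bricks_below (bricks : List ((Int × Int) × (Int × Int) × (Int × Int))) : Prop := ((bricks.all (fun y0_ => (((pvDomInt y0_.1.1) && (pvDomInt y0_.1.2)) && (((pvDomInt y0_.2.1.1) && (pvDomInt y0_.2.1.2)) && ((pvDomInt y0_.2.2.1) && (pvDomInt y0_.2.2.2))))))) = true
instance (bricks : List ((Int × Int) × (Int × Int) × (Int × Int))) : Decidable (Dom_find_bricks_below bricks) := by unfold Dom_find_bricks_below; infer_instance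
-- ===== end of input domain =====

-- B replaces A's single interleaved pass by two passes (build full occupancy columns, then derive each
-- brick's belows from the earlier entries of its columns); both sort `bricks` in place in Python — the
-- equivalence proved here is about the return value (the returned dict's items).


-- ===== PORT A =====
def find_bricks_below (bricks : List ((Int × Int) × (Int × Int) × (Int × Int))) : List (Int × List Int) :=
  let bs := PySem.List.sorted bricks (fun b => b.2.2.1) false
  let st := (PySem.List.enumerate bs 0).foldl
    (fun (st : Std.HashMap (Int × Int) (List Int) × PySem.Dict Int (PySem.Set Int)) ib =>
      -- for x, y in product(range(x_lo, x_hi+1), range(y_lo, y_hi+1)):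
      ((PySem.List.pyRange ib.2.1.1 (ib.2.1.2 + 1) 1).flatMap
          (fun x => (PySem.List.pyRange ib.2.2.1.1 (ib.2.2.1.2 + 1) 1).map (fun y => (x, y)))).foldl
        (fun st c =>
          let bricks_below := st.1.getD c []
          (st.1.insert c (bricks_below ++ [ib.1]),
           st.2.insert ib.1 (PySem.Set.update (st.2.getD ib.1 PySem.Set.empty) bricks_below)))
        st)
    ((Std.HashMap.emptyWithCapacity : Std.HashMap (Int × Int) (List Int)), PySem.Dict.empty)
  st.2.items

-- ===== PORT B =====
def find_bricks_below_alt (bricks : List ((Int × Int) × (Int × Int) × (Int × Int))) : List (Int × List Int) :=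
  let bs := PySem.List.sorted bricks (fun b => b.2.2.1) false
  -- pass 1: full occupancy columns
  let occupies := (PySem.List.enumerate bs 0).foldl
    (fun (occ : Std.HashMap (Int × Int) (List Int)) ib =>
      (PySem.List.pyRange ib.2.1.1 (ib.2.1.2 + 1) 1).foldl
        (fun occ x =>
          (PySem.List.pyRange ib.2.2.1.1 (ib.2.2.1.2 + 1) 1).foldl
            (fun occ y => occ.insert (x, y) (occ.getD (x, y) [] ++ [ib.1])) occ)
        occ)
    (Std.HashMap.emptyWithCapacity : Std.HashMap (Int × Int) (List Int))
  -- pass 2: belows[i] from the entries of i's columns that precede i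
  let belows := (PySem.List.enumerate bs 0).foldl
    (fun (bel : PySem.Dict Int (PySem.Set Int)) ib =>
      (PySem.List.pyRange ib.2.1.1 (ib.2.1.2 + 1) 1).foldl
        (fun bel x =>
          (PySem.List.pyRange ib.2.2.1.1 (ib.2.2.1.2 + 1) 1).foldl
            (fun bel y =>
              bel.insert ib.1 (PySem.Set.update (bel.getD ib.1 PySem.Set.empty)
                ((occupies.getD (x, y) []).takeWhile (fun j => decide (j < ib.1))))) bel)
        bel)
    PySem.Dict.empty
  belows.items

-- ===== PRECONDITION & SPEC =====
def Spec_find_bricks_below (bricks : List ((Int × Int) × (Int × Int) × (Int × Int))) (out : List (Int × List Int)) : Prop := out = find_bricks_below_alt bricks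
instance (bricks : List ((Int × Int) × (Int × Int) × (Int × Int))) (out : List (Int × List Int)) : Decidable (Spec_find_bricks_below bricks out) := by unfold Spec_find_bricks_below; infer_instance

-- ===== CLAIM (what is proved, stated in full; the proofs are below) =====
def Claim_equal_find_bricks_below : Prop := ∀ (bricks : List ((Int × Int) × (Int × Int) × (Int × Int))), Dom_find_bricks_below bricks → Spec_find_bricks_below bricks (find_bricks_below bricks)

-- ===== LEMMAS AND PROOFS =====

-- the list of footprint cells of a brick, in product(range, range) order
def pvCells (b : (Int × Int) × (Int × Int) × (Int × Int)) : List (Int × Int) :=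
  (PySem.List.pyRange b.1.1 (b.1.2 + 1) 1).flatMap
    (fun x => (PySem.List.pyRange b.2.1.1 (b.2.1.2 + 1) 1).map (fun y => (x, y)))

def pvOccCell (i : Int) (occ : Std.HashMap (Int × Int) (List Int)) (c : Int × Int) :
    Std.HashMap (Int × Int) (List Int) :=
  occ.insert c (occ.getD c [] ++ [i])

def pvOccBrick (occ : Std.HashMap (Int × Int) (List Int))
    (ib : Int × ((Int × Int) × (Int × Int) × (Int × Int))) : Std.HashMap (Int × Int) (List Int) :=
  (pvCells ib.2).foldl (pvOccCell ib.1) occ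

def pvStepA (st : Std.HashMap (Int × Int) (List Int) × PySem.Dict Int (PySem.Set Int))
    (ib : Int × ((Int × Int) × (Int × Int) × (Int × Int))) :
    Std.HashMap (Int × Int) (List Int) × PySem.Dict Int (PySem.Set Int) :=
  (pvCells ib.2).foldl
    (fun st c =>
      (pvOccCell ib.1 st.1 c,
       st.2.insert ib.1 (PySem.Set.update (st.2.getD ib.1 PySem.Set.empty) (st.1.getD c []))))
    st

def pvStepB (O : Std.HashMap (Int × Int) (List Int)) (bel : PySem.Dict Int (PySem.Set Int))
    (ib : Int × ((Int × Int) × (Int × Int) × (Int × Int))) : PySem.Dict Int (PySem.Set Int) :=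
  (pvCells ib.2).foldl
    (fun bel c =>
      bel.insert ib.1 (PySem.Set.update (bel.getD ib.1 PySem.Set.empty)
        ((O.getD c []).takeWhile (fun j => decide (j < ib.1)))))
    bel

-- a fold over a flatMap is the nested fold
theorem pv_foldl_flatMap {α β γ : Type} (l : List α) (f : α → List β) (g : γ → β → γ) (init : γ) :
    (l.flatMap f).foldl g init = l.foldl (fun a x => (f x).foldl g a) init := by
  induction l generalizing init with
  | nil => rfl
  | cons x xs ih => simp [List.flatMap_cons, List.foldl_append, ih]

theorem pvCells_nodup (b : (Int × Int) × (Int × Int) × (Int × Int)) : (pvCells b).Nodup := by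
  have h : pvCells b =
      (PySem.List.pyRange b.1.1 (b.1.2 + 1) 1) ×ˢ (PySem.List.pyRange b.2.1.1 (b.2.1.2 + 1) 1) := rfl
  rw [h]
  exact List.Nodup.product (PySem.List.nodup_pyRange_one _ _) (PySem.List.nodup_pyRange_one _ _)

-- M1: the column of c after one brick's cell loop
theorem pv_getD_foldl_occCell (cs : List (Int × Int)) (i : Int)
    (occ : Std.HashMap (Int × Int) (List Int)) (c : Int × Int) :
    ((cs.foldl (pvOccCell i) occ).getD c []) = occ.getD c [] ++ List.replicate (cs.count c) i := by
  induction cs generalizing occ with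
  | nil => simp
  | cons d ds ih =>
      rw [List.foldl_cons, ih]
      by_cases h : c = d
      · subst h
        have hins : (pvOccCell i occ c).getD c [] = occ.getD c [] ++ [i] := by
          simp [pvOccCell]
        rw [hins, List.count_cons_self, List.append_assoc]
        rfl
      · have hins : (pvOccCell i occ d).getD c [] = occ.getD c [] := by
          simp [pvOccCell, Std.HashMap.getD_insert, Ne.symm h]
        rw [hins]
        have : ¬ d = c := fun h2 => h h2.symm
        simp [this]

-- takeWhile ignores an appended tail that its predicate rejects
theorem pv_takeWhile_append_fail {α : Type} (p : α → Bool) (x y : List α)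
    (hy : ∀ a ∈ y, p a = false) : (x ++ y).takeWhile p = x.takeWhile p := by
  induction x with
  | nil =>
      cases y with
      | nil => rfl
      | cons a t => simp [hy a List.mem_cons_self]
  | cons b xb ih =>
      simp only [List.cons_append, List.takeWhile_cons]
      cases p b <;> simp [ih]

-- M2': folding bricks with indices ≥ m does not change the takeWhile-below-m part of a column
theorem pv_takeWhile_foldl_occBrick (l : List (Int × ((Int × Int) × (Int × Int) × (Int × Int))))
    (occ : Std.HashMap (Int × Int) (List Int)) (c : Int × Int) (m : Int)
    (hm : ∀ ib ∈ l, m ≤ ib.1) :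
    ((l.foldl pvOccBrick occ).getD c []).takeWhile (fun j => decide (j < m))
      = (occ.getD c []).takeWhile (fun j => decide (j < m)) := by
  induction l generalizing occ with
  | nil => rfl
  | cons ib l ih =>
      rw [List.foldl_cons, ih _ (fun p hp => hm p (List.mem_cons_of_mem _ hp))]
      have hge : ¬ ib.1 < m := not_lt.mpr (hm ib List.mem_cons_self)
      rw [show pvOccBrick occ ib = (pvCells ib.2).foldl (pvOccCell ib.1) occ from rfl,
        pv_getD_foldl_occCell,
        pv_takeWhile_append_fail _ _ _ (fun a ha => by
          rw [List.eq_of_mem_replicate ha]; simpa using hge)]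

-- M3: A's inner cell loop splits into the occ loop and a bel loop reading pre-brick columns
theorem pv_inner_split (cs : List (Int × Int)) (i : Int)
    (occ : Std.HashMap (Int × Int) (List Int)) (bel : PySem.Dict Int (PySem.Set Int))
    (v : Int × Int → List Int)
    (hv : ∀ c ∈ cs, occ.getD c [] = v c) (hnd : cs.Nodup) :
    cs.foldl
      (fun st c =>
        (pvOccCell i st.1 c,
         st.2.insert i (PySem.Set.update (st.2.getD i PySem.Set.empty) (st.1.getD c []))))
      (occ, bel)
    = (cs.foldl (pvOccCell i) occ,
       cs.foldl (fun bel c =>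
         bel.insert i (PySem.Set.update (bel.getD i PySem.Set.empty) (v c))) bel) := by
  induction cs generalizing occ bel with
  | nil => rfl
  | cons c cs ih =>
      have hc : occ.getD c [] = v c := hv c List.mem_cons_self
      rw [List.foldl_cons, List.foldl_cons, List.foldl_cons, hc]
      refine ih (pvOccCell i occ c) _ ?_ hnd.of_cons
      intro c' hc'
      have hne : c' ≠ c := fun h => (List.nodup_cons.mp hnd).1 (h ▸ hc')
      rw [show (pvOccCell i occ c).getD c' [] = occ.getD c' [] by
        simp [pvOccCell, Std.HashMap.getD_insert, Ne.symm hne]]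
      exact hv c' (List.mem_cons_of_mem _ hc')

-- M4: the main invariant — A's interleaved pass agrees with B's second pass against the full columns
theorem pv_main (l : List ((Int × Int) × (Int × Int) × (Int × Int))) (n : Nat)
    (O occ : Std.HashMap (Int × Int) (List Int)) (bel : PySem.Dict Int (PySem.Set Int))
    (hO : O = (PySem.List.enumerate l (n : Int)).foldl pvOccBrick occ)
    (hocc : ∀ c j, j ∈ occ.getD c [] → j < (n : Int)) :
    ((PySem.List.enumerate l (n : Int)).foldl pvStepA (occ, bel)).2
      = (PySem.List.enumerate l (n : Int)).foldl (pvStepB O) bel := by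
  induction l generalizing n occ bel with
  | nil => rfl
  | cons b l ih =>
      have hv : ∀ c ∈ pvCells b, occ.getD c []
          = (O.getD c []).takeWhile (fun j => decide (j < (n : Int))) := by
        intro c _
        have hge : ∀ ib ∈ PySem.List.enumerate (b :: l) (n : Int), (n : Int) ≤ ib.1 := by
          intro ib hib
          rcases (PySem.List.mem_enumerate_iff _ _ _).mp hib with ⟨k, hk, rfl⟩
          show (n : Int) ≤ (n : Int) + (k : Int)
          omega
        rw [hO, pv_takeWhile_foldl_occBrick _ _ _ _ hge]
        exact (List.takeWhile_eq_self_iff.mpr (fun j hj => decide_eq_true (hocc c j hj))).symm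
      rw [PySem.List.enumerate_cons] at hO ⊢
      rw [List.foldl_cons, List.foldl_cons]
      have hA : pvStepA (occ, bel) ((n : Int), b)
          = ((pvCells b).foldl (pvOccCell (n : Int)) occ,
             pvStepB O bel ((n : Int), b)) :=
        pv_inner_split (pvCells b) (n : Int) occ bel
          (fun c => (O.getD c []).takeWhile (fun j => decide (j < (n : Int)))) hv (pvCells_nodup b)
      rw [hA]
      have hcast : ((n : Int) + 1) = ((n + 1 : Nat) : Int) := by push_cast; ring
      rw [hcast] at hO ⊢
      refine ih (n + 1) _ _ hO ?_
      intro c j hj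
      rw [pv_getD_foldl_occCell] at hj
      rcases List.mem_append.mp hj with h | h
      · have := hocc c j h; push_cast; omega
      · have := List.eq_of_mem_replicate h; push_cast; omega

-- ===== VERDICT (by name: the statement is the Claim_ definition above) =====
theorem find_bricks_below_spec : Claim_equal_find_bricks_below := by
  intro bricks _
  show find_bricks_below bricks = find_bricks_below_alt bricks
  have hA : find_bricks_below bricks
      = ((PySem.List.enumerate (PySem.List.sorted bricks (fun b => b.2.2.1) false) 0).foldl
          pvStepA ((Std.HashMap.emptyWithCapacity : Std.HashMap (Int × Int) (List Int)), PySem.Dict.empty)).2.items := rfl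
  have hB1 : ∀ occ : Std.HashMap (Int × Int) (List Int),
      (PySem.List.enumerate (PySem.List.sorted bricks (fun b => b.2.2.1) false) 0).foldl
        (fun (occ : Std.HashMap (Int × Int) (List Int)) ib =>
          (PySem.List.pyRange ib.2.1.1 (ib.2.1.2 + 1) 1).foldl
            (fun occ x =>
              (PySem.List.pyRange ib.2.2.1.1 (ib.2.2.1.2 + 1) 1).foldl
                (fun occ y => occ.insert (x, y) (occ.getD (x, y) [] ++ [ib.1])) occ)
            occ)
        occ
      = (PySem.List.enumerate (PySem.List.sorted bricks (fun b => b.2.2.1) false) 0).foldl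
          pvOccBrick occ := by
    intro occ
    refine PySem.List.foldl_congr_mem _ _ _ _ ?_
    intro acc ib _
    rw [pvOccBrick, pvCells, pv_foldl_flatMap]
    simp only [List.foldl_map]
    rfl
  have hB2 : ∀ (O : Std.HashMap (Int × Int) (List Int)) (bel : PySem.Dict Int (PySem.Set Int)),
      (PySem.List.enumerate (PySem.List.sorted bricks (fun b => b.2.2.1) false) 0).foldl
        (fun (bel : PySem.Dict Int (PySem.Set Int)) ib =>
          (PySem.List.pyRange ib.2.1.1 (ib.2.1.2 + 1) 1).foldl
            (fun bel x =>
              (PySem.List.pyRange ib.2.2.1.1 (ib.2.2.1.2 + 1) 1).foldl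
                (fun bel y =>
                  bel.insert ib.1 (PySem.Set.update (bel.getD ib.1 PySem.Set.empty)
                    ((O.getD (x, y) []).takeWhile (fun j => decide (j < ib.1))))) bel)
            bel)
        bel
      = (PySem.List.enumerate (PySem.List.sorted bricks (fun b => b.2.2.1) false) 0).foldl
          (pvStepB O) bel := by
    intro O bel
    refine PySem.List.foldl_congr_mem _ _ _ _ ?_
    intro acc ib _
    rw [pvStepB, pvCells, pv_foldl_flatMap]
    simp only [List.foldl_map]
  have hB : find_bricks_below_alt bricks
      = ((PySem.List.enumerate (PySem.List.sorted bricks (fun b => b.2.2.1) false) 0).foldl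
          (pvStepB ((PySem.List.enumerate (PySem.List.sorted bricks (fun b => b.2.2.1) false) 0).foldl
            pvOccBrick Std.HashMap.emptyWithCapacity)) PySem.Dict.empty).items := by
    show ((PySem.List.enumerate _ 0).foldl _ PySem.Dict.empty :
        PySem.Dict Int (PySem.Set Int)).items = _
    rw [hB1, hB2]
  rw [hA, hB]
  congr 1
  have h0 : (0 : Int) = ((0 : Nat) : Int) := rfl
  rw [h0]
  exact pv_main _ 0 _ Std.HashMap.emptyWithCapacity PySem.Dict.empty rfl
    (fun c j hj => by simp [Std.HashMap.getD_emptyWithCapacity] at hj)
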